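-- pv_equiv track=rewrite | github.com/jongko54/webEmbedding | bundle/source-first-clone/mcp/source_first_clone/reproduction.py | _preferred_renderer_hint
-- ===== SOURCE A (Python) =====
-- def _preferred_renderer_hint(rebuild_artifacts: dict[str, str]) -> dict[str, str] | None:
--     if not isinstance(rebuild_artifacts, dict):
--         return None
--
--     next_runtime_keys = (
--         "next-app/app/layout.tsx",
--         "next-app/app/page.tsx",
--         "next-app/app/globals.css",
--         "next-app/components/BoundedReferencePage.tsx",
--         "next-app/components/reference-data.ts",
--     )
--     if all(rebuild_artifacts.get(key) for key in next_runtime_keys):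
--         return {
--             "name": "next-runtime-app",
--             "reason": "Latest generated next-app scaffold is present, so the booted Next runtime should be verified first.",
--             "entrypoint": rebuild_artifacts["next-app/app/page.tsx"],
--         }
--
--     if rebuild_artifacts.get("app-preview.html"):
--         return {
--             "name": "role-inferred-app",
--             "reason": "Role-inferred app preview is the freshest bounded renderer before the low-level starter scaffold.",
--             "entrypoint": rebuild_artifacts["app-preview.html"],
--         }
--
--     if rebuild_artifacts.get("starter.html"):
--         return {
--             "name": "starter",
--             "reason": "Starter scaffold is the only available renderer entrypoint.",
--             "entrypoint": rebuild_artifacts["starter.html"],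
--         }
--
--     return None
-- ===== SOURCE B (Python) =====
-- _NEXT_RUNTIME_KEYS = frozenset({
--     "next-app/app/layout.tsx",
--     "next-app/app/page.tsx",
--     "next-app/app/globals.css",
--     "next-app/components/BoundedReferencePage.tsx",
--     "next-app/components/reference-data.ts",
-- })
--
--
-- def _preferred_renderer_hint(rebuild_artifacts):
--     if not isinstance(rebuild_artifacts, dict):
--         return None
--
--     # One pass over the items: collect the set of truthy keys and capture the
--     # three candidate entrypoint values on the way; no dict lookups afterwards.
--     present = set()
--     page = preview = starter = None
--     for key, value in rebuild_artifacts.items():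
--         if not value:
--             continue
--         present.add(key)
--         if key == "next-app/app/page.tsx":
--             page = value
--         elif key == "app-preview.html":
--             preview = value
--         elif key == "starter.html":
--             starter = value
--
--     if _NEXT_RUNTIME_KEYS <= present:
--         return {
--             "name": "next-runtime-app",
--             "reason": "Latest generated next-app scaffold is present, so the booted Next runtime should be verified first.",
--             "entrypoint": page,
--         }
--     if preview is not None:
--         return {
--             "name": "role-inferred-app",
--             "reason": "Role-inferred app preview is the freshest bounded renderer before the low-level starter scaffold.",
--             "entrypoint": preview,
--         }
--     if starter is not None:
--         return {
--             "name": "starter",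
--             "reason": "Starter scaffold is the only available renderer entrypoint.",
--             "entrypoint": starter,
--         }
--     return None
-- ===== Notes on version B (the rewrite author's own statement) =====
-- stated objective: alternative
-- what changed: Replaces A's staged dict.get truthiness probes and per-branch subscript lookups with a single pass over the items that accumulates the set of truthy keys and captures the three candidate entrypoint values, followed by subset/None tests on the accumulator state; no dictionary lookup happens after the pass.
import Mathlib
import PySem

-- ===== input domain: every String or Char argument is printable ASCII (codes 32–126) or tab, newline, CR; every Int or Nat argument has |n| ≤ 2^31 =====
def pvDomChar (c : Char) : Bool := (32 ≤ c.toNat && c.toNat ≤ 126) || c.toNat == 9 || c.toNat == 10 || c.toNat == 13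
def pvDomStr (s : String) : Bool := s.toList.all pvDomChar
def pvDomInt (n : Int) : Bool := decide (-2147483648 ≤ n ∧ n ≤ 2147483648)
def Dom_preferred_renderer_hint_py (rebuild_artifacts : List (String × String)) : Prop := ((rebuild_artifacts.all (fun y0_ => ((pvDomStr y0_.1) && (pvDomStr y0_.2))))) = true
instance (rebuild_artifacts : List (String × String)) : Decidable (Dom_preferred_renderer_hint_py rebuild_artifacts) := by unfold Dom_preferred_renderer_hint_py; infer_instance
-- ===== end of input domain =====

-- B replaces A's staged dict.get probes with one pass over the items accumulating a truthy-key set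
-- and the candidate entrypoint values (objective: alternative; same cost).

-- ===== PORT A =====
-- Python's truthiness test on dict.get(key): none or the empty string is falsy (values are str on this domain).
def pvTruthyA (o : Option String) : Bool :=
  match o with
  | some s => s != ""
  | none => false

-- All inputs of the Lean type are dicts, so A's 'isinstance' guard never fires here.
-- Inside each branch the subscript rebuild_artifacts[k] is guarded truthy, so .getD "" is exact (no KeyError reachable).
def preferred_renderer_hint_py (rebuild_artifacts : List (String × String)) : Option (List (String × String)) :=
  let next_runtime_keys := ["next-app/app/layout.tsx", "next-app/app/page.tsx", "next-app/app/globals.css",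
      "next-app/components/BoundedReferencePage.tsx", "next-app/components/reference-data.ts"]
  if next_runtime_keys.all (fun key => pvTruthyA ((PySem.Dict.mk rebuild_artifacts).get? key)) then
    some [("name", "next-runtime-app"),
          ("reason", "Latest generated next-app scaffold is present, so the booted Next runtime should be verified first."),
          ("entrypoint", ((PySem.Dict.mk rebuild_artifacts).get? "next-app/app/page.tsx").getD "")]
  else if pvTruthyA ((PySem.Dict.mk rebuild_artifacts).get? "app-preview.html") then
    some [("name", "role-inferred-app"),
          ("reason", "Role-inferred app preview is the freshest bounded renderer before the low-level starter scaffold."),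
          ("entrypoint", ((PySem.Dict.mk rebuild_artifacts).get? "app-preview.html").getD "")]
  else if pvTruthyA ((PySem.Dict.mk rebuild_artifacts).get? "starter.html") then
    some [("name", "starter"),
          ("reason", "Starter scaffold is the only available renderer entrypoint."),
          ("entrypoint", ((PySem.Dict.mk rebuild_artifacts).get? "starter.html").getD "")]
  else
    none

-- ===== PORT B =====
-- The loop state of B's single pass: the set of truthy keys plus the three captured values.
structure PvStB where
  present : PySem.Set String
  page : Option String
  preview : Option String
  starter : Option String
deriving Repr, DecidableEq

-- Body of B's 'for key, value in rebuild_artifacts.items():' loop.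
def pvStepB (s : PvStB) (kv : String × String) : PvStB :=
  if kv.2 != "" then
    let s1 : PvStB := { s with present := PySem.Set.add s.present kv.1 }
    if kv.1 == "next-app/app/page.tsx" then { s1 with page := some kv.2 }
    else if kv.1 == "app-preview.html" then { s1 with preview := some kv.2 }
    else if kv.1 == "starter.html" then { s1 with starter := some kv.2 }
    else s1
  else s

def pvNextRuntimeKeysB : List String :=
  ["next-app/app/layout.tsx", "next-app/app/page.tsx", "next-app/app/globals.css",
   "next-app/components/BoundedReferencePage.tsx", "next-app/components/reference-data.ts"]

-- When the subset test holds, 'page' is guaranteed set (its key is truthy), so .getD "" is exact.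
def preferred_renderer_hint_py_alt (rebuild_artifacts : List (String × String)) : Option (List (String × String)) :=
  let s := rebuild_artifacts.foldl pvStepB ⟨PySem.Set.empty, none, none, none⟩
  if pvNextRuntimeKeysB.all (fun k => PySem.Set.contains s.present k) then
    some [("name", "next-runtime-app"),
          ("reason", "Latest generated next-app scaffold is present, so the booted Next runtime should be verified first."),
          ("entrypoint", s.page.getD "")]
  else match s.preview with
  | some v =>
    some [("name", "role-inferred-app"),
          ("reason", "Role-inferred app preview is the freshest bounded renderer before the low-level starter scaffold."),
          ("entrypoint", v)]
  | none => match s.starter with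
    | some v =>
      some [("name", "starter"),
            ("reason", "Starter scaffold is the only available renderer entrypoint."),
            ("entrypoint", v)]
    | none => none

-- ===== PRECONDITION & SPEC =====
-- Pre_ excludes association lists with duplicate keys: those do not represent any Python dict
-- (A's argument is a dict, whose keys are necessarily distinct), so nothing of A's domain is lost.
def Pre_preferred_renderer_hint_py (rebuild_artifacts : List (String × String)) : Prop :=
  (rebuild_artifacts.map Prod.fst).Nodup
instance (rebuild_artifacts : List (String × String)) : Decidable (Pre_preferred_renderer_hint_py rebuild_artifacts) := by unfold Pre_preferred_renderer_hint_py; infer_instance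

def pvWitness_preferred_renderer_hint_py : (List (String × String)) :=
  [("starter.html", "<html>starter</html>"), ("app-preview.html", "")]

def Spec_preferred_renderer_hint_py (rebuild_artifacts : List (String × String)) (out : Option (List (String × String))) : Prop := out = preferred_renderer_hint_py_alt rebuild_artifacts
instance (rebuild_artifacts : List (String × String)) (out : Option (List (String × String))) : Decidable (Spec_preferred_renderer_hint_py rebuild_artifacts out) := by unfold Spec_preferred_renderer_hint_py; infer_instance

-- ===== CLAIM =====
def Claim_equal_preferred_renderer_hint_py : Prop := ∀ (rebuild_artifacts : List (String × String)), Dom_preferred_renderer_hint_py rebuild_artifacts → Pre_preferred_renderer_hint_py rebuild_artifacts → Spec_preferred_renderer_hint_py rebuild_artifacts (preferred_renderer_hint_py rebuild_artifacts)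

-- ===== LEMMAS AND PROOFS =====

-- projections of one loop step
theorem pvStepB_present (s : PvStB) (kv : String × String) :
    (pvStepB s kv).present = if kv.2 = "" then s.present else PySem.Set.add s.present kv.1 := by
  unfold pvStepB; split_ifs <;> simp_all

theorem pvStepB_page (s : PvStB) (kv : String × String) :
    (pvStepB s kv).page =
      if kv.2 ≠ "" ∧ kv.1 = "next-app/app/page.tsx" then some kv.2 else s.page := by
  unfold pvStepB; split_ifs <;> simp_all

theorem pvStepB_preview (s : PvStB) (kv : String × String) :
    (pvStepB s kv).preview =
      if kv.2 ≠ "" ∧ kv.1 = "app-preview.html" then some kv.2 else s.preview := by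
  unfold pvStepB; split_ifs <;> simp_all

theorem pvStepB_starter (s : PvStB) (kv : String × String) :
    (pvStepB s kv).starter =
      if kv.2 ≠ "" ∧ kv.1 = "starter.html" then some kv.2 else s.starter := by
  unfold pvStepB; split_ifs <;> simp_all

-- loop invariant for the truthy-key set (keys distinct)
theorem pvFold_present (l : List (String × String)) (h : (l.map Prod.fst).Nodup)
    (s : PvStB) (k : String) :
    k ∈ (l.foldl pvStepB s).present ↔
      k ∈ s.present ∨ pvTruthyA ((PySem.Dict.mk l).get? k) = true := by
  induction l generalizing s with
  | nil => simp [pvTruthyA, PySem.Dict.get?]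
  | cons kv t ih =>
    simp only [List.map_cons, List.nodup_cons] at h
    rw [List.foldl_cons, ih h.2, PySem.Dict.get?_mk_cons]
    have hnone : (PySem.Dict.mk t).get? kv.1 = none := by
      rw [PySem.Dict.get?_eq_none_iff_not_mem_keys]
      simpa using h.1
    rw [pvStepB_present]
    by_cases hk : kv.1 = k
    · subst hk
      rw [hnone]
      by_cases hv : kv.2 = "" <;> simp [hv, pvTruthyA, PySem.Set.mem_add]
    · have : (kv.1 == k) = false := by simpa using hk
      rw [this]
      by_cases hv : kv.2 = "" <;> simp [hv, PySem.Set.mem_add, Ne.symm hk]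

-- generic loop invariant for a captured field (keys distinct)
theorem pvFold_field (key : String)
    (fld : PvStB → Option String)
    (hstep : ∀ s kv, fld (pvStepB s kv) =
      if kv.2 ≠ "" ∧ kv.1 = key then some kv.2 else fld s)
    (l : List (String × String)) (h : (l.map Prod.fst).Nodup) (s : PvStB) :
    fld (l.foldl pvStepB s) =
      if pvTruthyA ((PySem.Dict.mk l).get? key) = true
      then (PySem.Dict.mk l).get? key else fld s := by
  induction l generalizing s with
  | nil => simp [pvTruthyA, PySem.Dict.get?]
  | cons kv t ih =>
    simp only [List.map_cons, List.nodup_cons] at h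
    rw [List.foldl_cons, ih h.2, PySem.Dict.get?_mk_cons, hstep]
    by_cases hk : kv.1 = key
    · subst hk
      have hnone : (PySem.Dict.mk t).get? kv.1 = none := by
        rw [PySem.Dict.get?_eq_none_iff_not_mem_keys]
        simpa using h.1
      rw [hnone]
      by_cases hv : kv.2 = "" <;> simp [hv, pvTruthyA]
    · have : (kv.1 == key) = false := by simpa using hk
      rw [this]
      simp [hk]

-- ===== VERDICT =====
theorem preferred_renderer_hint_py_spec : Claim_equal_preferred_renderer_hint_py := by
  intro l _ hpre
  have hpre' : (l.map Prod.fst).Nodup := hpre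
  have hpage := pvFold_field "next-app/app/page.tsx" PvStB.page pvStepB_page l hpre'
    ⟨PySem.Set.empty, none, none, none⟩
  have hprev := pvFold_field "app-preview.html" PvStB.preview pvStepB_preview l hpre'
    ⟨PySem.Set.empty, none, none, none⟩
  have hstart := pvFold_field "starter.html" PvStB.starter pvStepB_starter l hpre'
    ⟨PySem.Set.empty, none, none, none⟩
  have hmem : ∀ k, PySem.Set.contains
      (l.foldl pvStepB ⟨PySem.Set.empty, none, none, none⟩).present k
      = pvTruthyA ((PySem.Dict.mk l).get? k) := by
    intro k
    have h := pvFold_present l hpre' ⟨PySem.Set.empty, none, none, none⟩ k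
    simp only [PySem.Set.empty, List.not_mem_nil, false_or] at h
    rw [Bool.eq_iff_iff]
    simpa using h
  unfold Spec_preferred_renderer_hint_py preferred_renderer_hint_py preferred_renderer_hint_py_alt pvNextRuntimeKeysB
  simp only [hmem, hpage, hprev, hstart, List.all_cons, List.all_nil, Bool.and_true,
    Bool.and_eq_true]
  by_cases h1 : pvTruthyA ((PySem.Dict.mk l).get? "next-app/app/layout.tsx") = true ∧
      pvTruthyA ((PySem.Dict.mk l).get? "next-app/app/page.tsx") = true ∧
      pvTruthyA ((PySem.Dict.mk l).get? "next-app/app/globals.css") = true ∧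
      pvTruthyA ((PySem.Dict.mk l).get? "next-app/components/BoundedReferencePage.tsx") = true ∧
      pvTruthyA ((PySem.Dict.mk l).get? "next-app/components/reference-data.ts") = true
  · rw [if_pos h1, if_pos h1, if_pos h1.2.1]
  · rw [if_neg h1, if_neg h1]
    by_cases h2 : pvTruthyA ((PySem.Dict.mk l).get? "app-preview.html") = true
    · rw [if_pos h2, if_pos h2]
      cases hg : (PySem.Dict.mk l).get? "app-preview.html" with
      | none => simp [hg, pvTruthyA] at h2
      | some v => simp
    · rw [if_neg h2, if_neg h2]
      by_cases h3 : pvTruthyA ((PySem.Dict.mk l).get? "starter.html") = true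
      · rw [if_pos h3, if_pos h3]
        cases hg : (PySem.Dict.mk l).get? "starter.html" with
        | none => simp [hg, pvTruthyA] at h3
        | some v => simp
      · rw [if_neg h3, if_neg h3]
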